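-- pv_equiv track=rewrite | github.com/RyannDaGreat/rp | rp_ptpython/selection_utils.py | get_word_spans
-- ===== SOURCE A (Python) =====
-- from typing import List, Tuple, Optional, Set
--
-- Span = Tuple[int, int]
--
-- def get_word_spans(code: str) -> Set[Span]:
--     """Spans for words/identifiers."""
--     spans, i = set(), 0
--     while i < len(code):
--         if code[i].isalnum() or code[i] == '_':
--             start = i
--             while i < len(code) and (code[i].isalnum() or code[i] == '_'):
--                 i += 1
--             spans.add((start, i))
--         else:
--             i += 1
--     return spans
-- ===== SOURCE B (Python) =====
-- from typing import Set, Tuple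
--
-- Span = Tuple[int, int]
--
-- def get_word_spans(code: str) -> Set[Span]:
--     """Spans for words/identifiers, via boundary detection: build a word-class
--     mask, collect run starts and run ends by comparing neighbouring mask
--     entries, and zip them."""
--     w = [c.isalnum() or c == '_' for c in code]
--     n = len(w)
--     starts = [i for i in range(n) if w[i] and (i == 0 or not w[i - 1])]
--     ends = [i + 1 for i in range(n) if w[i] and (i == n - 1 or not w[i + 1])]
--     return set(zip(starts, ends))
-- ===== Notes on version B (the rewrite author's own statement) =====
-- stated objective: alternative
-- what changed: Replaces the nested while-loop run scan by staged passes: build a word-class mask, detect run starts and run ends by comparing neighbouring mask entries, and zip the starts with the ends.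
import Mathlib
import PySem

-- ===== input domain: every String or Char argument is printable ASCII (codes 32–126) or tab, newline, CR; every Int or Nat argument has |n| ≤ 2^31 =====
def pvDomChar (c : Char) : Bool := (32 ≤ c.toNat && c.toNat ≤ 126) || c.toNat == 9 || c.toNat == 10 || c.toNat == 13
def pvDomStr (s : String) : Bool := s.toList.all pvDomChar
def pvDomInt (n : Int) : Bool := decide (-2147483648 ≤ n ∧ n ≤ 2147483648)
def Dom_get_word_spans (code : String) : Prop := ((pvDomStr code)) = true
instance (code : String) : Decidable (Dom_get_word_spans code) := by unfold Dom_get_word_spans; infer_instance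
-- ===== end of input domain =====

-- B replaces A's nested while-loop run scan by staged passes: a word-class mask,
-- boundary detection of run starts/ends by comparing neighbouring mask entries, and a zip.

-- the character predicate both versions use: c.isalnum() or c == '_'
def pvIsWord (c : Char) : Bool := PySem.Chars.isalnum c || c == '_'

-- ===== PORT A =====
-- inner 'while i < len(code) and (code[i].isalnum() or code[i]=='_'): i += 1'
def pvInnerA : List Char → Int → (List Char × Int)
  | [], i => ([], i)
  | c :: rest, i => if pvIsWord c then pvInnerA rest (i + 1) else (c :: rest, i)

theorem pvInnerA_fst_length (cs : List Char) (i : Int) :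
    (pvInnerA cs i).1.length ≤ cs.length := by
  induction cs generalizing i with
  | nil => simp [pvInnerA]
  | cons c rest ih =>
    simp only [pvInnerA]
    split
    · exact Nat.le_succ_of_le (ih (i + 1))
    · simp

-- outer while-loop of A, carrying the running index and the accumulated set
def pvGoA (cs : List Char) (i : Int) (spans : PySem.Set (Int × Int)) : List (Int × Int) :=
  match cs with
  | [] => spans
  | c :: rest =>
    if pvIsWord c then
      let p := pvInnerA rest (i + 1)
      pvGoA p.1 p.2 (PySem.Set.add spans (i, p.2))
    else
      pvGoA rest (i + 1) spans
termination_by cs.length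
decreasing_by
  · exact Nat.lt_succ_of_le (pvInnerA_fst_length rest (i + 1))
  · simp

def get_word_spans (code : String) : List (Int × Int) :=
  pvGoA code.toList 0 PySem.Set.empty

-- ===== PORT B =====
-- w = [c.isalnum() or c == '_' for c in code]; starts/ends comprehensions; zip.
-- (`w[i-1]` / `w[i+1]` are only reached by Python after the `i == 0` / `i == n-1`
-- short-circuit guard, so the corresponding `List.getD` reads are in range there;
-- where the guard already decides the disjunction, the getD value is irrelevant.)
def get_word_spans_alt (code : String) : List (Int × Int) :=
  let w : List Bool := code.toList.map pvIsWord
  let n : Nat := w.length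
  let starts : List Int :=
    ((List.range n).filter (fun i => w.getD i false && (i == 0 || !(w.getD (i - 1) false)))).map
      (fun i : Nat => (i : Int))
  let ends : List Int :=
    ((List.range n).filter (fun i => w.getD i false && (i == n - 1 || !(w.getD (i + 1) false)))).map
      (fun i : Nat => (i : Int) + 1)
  starts.zip ends

-- ===== PRECONDITION & SPEC =====
def Spec_get_word_spans (code : String) (out : List (Int × Int)) : Prop := out = get_word_spans_alt code
instance (code : String) (out : List (Int × Int)) : Decidable (Spec_get_word_spans code out) := by unfold Spec_get_word_spans; infer_instance

-- ===== CLAIM (what is proved, stated in full; the proofs are below) =====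
def Claim_equal_get_word_spans : Prop := ∀ (code : String), Dom_get_word_spans code → Spec_get_word_spans code (get_word_spans code)

-- ===== LEMMAS AND PROOFS =====

-- proof-only middle form: A's loop rewritten as run consumption
def pvRun (k : Bool) : List Char → Nat × List Char
  | [] => (0, [])
  | c :: rest => if pvIsWord c == k then ((pvRun k rest).1 + 1, (pvRun k rest).2) else (0, c :: rest)

theorem pvRun_snd_length (k : Bool) (cs : List Char) : (pvRun k cs).2.length ≤ cs.length := by
  induction cs with
  | nil => simp [pvRun]
  | cons c rest ih =>
    simp only [pvRun]
    split
    · exact Nat.le_succ_of_le ih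
    · simp

def pvGoB (cs : List Char) (i : Int) : List (Int × Int) :=
  match cs with
  | [] => []
  | c :: rest =>
    let k := pvIsWord c
    let p := pvRun k rest
    let n : Int := (p.1 : Int) + 1
    (if k then [(i, i + n)] else []) ++ pvGoB p.2 (i + n)
termination_by cs.length
decreasing_by
  exact Nat.lt_succ_of_le (pvRun_snd_length _ rest)

-- A's inner scan computes the same (remainder, end index) as the run length
theorem pvInnerA_eq_run (cs : List Char) (i : Int) :
    pvInnerA cs i = ((pvRun true cs).2, i + (pvRun true cs).1) := by
  induction cs generalizing i with
  | nil => simp [pvInnerA, pvRun]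
  | cons c rest ih =>
    by_cases h : pvIsWord c
    · simp only [pvInnerA, pvRun, h, if_pos, beq_self_eq_true]
      rw [ih]
      simp only [Prod.mk.injEq, true_and]
      push_cast; ring
    · simp [pvInnerA, pvRun, h]

theorem pvGoB_nonword (c : Char) (rest : List Char) (i : Int) (h : pvIsWord c = false) :
    pvGoB (c :: rest) i = pvGoB rest (i + 1) := by
  cases rest with
  | nil => simp [pvGoB, pvRun, h]
  | cons d rest2 =>
    by_cases hd : pvIsWord d
    · simp [pvGoB, pvRun, h, hd]
    · conv_rhs => rw [pvGoB]
      simp only [pvGoB, pvRun, h, Bool.false_eq, hd, beq_self_eq_true]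
      congr 1
      push_cast
      congr 1
      ring

-- main invariant for A: its loop appends the run form after the accumulated set
theorem pvGoA_eq (cs : List Char) (i : Int) (spans : PySem.Set (Int × Int))
    (h : ∀ p ∈ spans, p.1 < i) : pvGoA cs i spans = spans ++ pvGoB cs i := by
  induction hn : cs.length using Nat.strong_induction_on generalizing cs i spans with
  | _ n ih =>
  cases cs with
  | nil => simp [pvGoA, pvGoB]
  | cons c rest =>
    by_cases hc : pvIsWord c
    · rw [pvGoA]
      simp only [hc, if_true]
      rw [pvInnerA_eq_run]
      have hfresh : (i, i + 1 + ((pvRun true rest).1 : Int)) ∉ spans := by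
        intro hm
        have := h _ hm
        simp at this
      have hadd : PySem.Set.add spans (i, i + 1 + ((pvRun true rest).1 : Int))
          = spans ++ [(i, i + 1 + ((pvRun true rest).1 : Int))] := by
        simp [PySem.Set.add, hfresh]
      rw [hadd]
      have hlen : (pvRun true rest).2.length < n := by
        subst hn
        exact Nat.lt_succ_of_le (pvRun_snd_length true rest)
      rw [ih _ hlen _ _ _ ?_ rfl]
      · rw [pvGoB]
        simp only [hc, if_true]
        have : i + ((((pvRun true rest).1 : Int)) + 1) = i + 1 + ((pvRun true rest).1 : Int) := by
          ring
        rw [this]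
        simp
      · intro p hp
        have hnn : (0:Int) ≤ ((pvRun true rest).1 : Int) := Int.natCast_nonneg _
        rcases List.mem_append.mp hp with hp | hp
        · have h1 := h _ hp
          omega
        · simp only [List.mem_singleton] at hp
          subst hp
          simp only
          omega
    · rw [pvGoA]
      simp only [hc, Bool.false_eq_true, if_false]
      have hlen : rest.length < n := by subst hn; simp
      rw [ih _ hlen _ _ _ ?_ rfl]
      · rw [pvGoB_nonword c rest i (by simpa using hc)]
      · intro p hp
        have := h _ hp
        omega

-- proof-only recursive forms of B's boundary lists
def startsF : Bool → List Bool → Int → List Int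
  | _, [], _ => []
  | prev, b :: rest, i => (if b && !prev then [i] else []) ++ startsF b rest (i + 1)

def endsF : List Bool → Int → List Int
  | [], _ => []
  | b :: rest, i => (if b && !(rest.headD false) then [i + 1] else []) ++ endsF rest (i + 1)

-- the filter-over-range form of starts equals the recursive form
theorem startsF_filter (w : List Bool) (prev : Bool) (off : Int) :
    ((List.range w.length).filter
        (fun i => w.getD i false && !((prev :: w).getD i false))).map (fun i : Nat => off + (i : Int))
      = startsF prev w off := by
  induction w generalizing prev off with
  | nil => simp [startsF]
  | cons b rest ih =>
    rw [List.length_cons, List.range_succ_eq_map, List.filter_cons]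
    have htail :
        ((((List.range rest.length).map Nat.succ).filter
            (fun i => (b :: rest).getD i false && !((prev :: b :: rest).getD i false))).map
          (fun i : Nat => off + (i : Int)))
        = startsF b rest (off + 1) := by
      have hfil : List.filter
            ((fun i => (b :: rest).getD i false && !((prev :: b :: rest).getD i false)) ∘ Nat.succ)
            (List.range rest.length)
          = List.filter (fun i => rest.getD i false && !((b :: rest).getD i false))
            (List.range rest.length) :=
        List.filter_congr (by intro a _; simp [Function.comp, Nat.succ_eq_add_one])
      rw [List.filter_map, List.map_map, hfil, ← ih b (off + 1)]
      exact List.map_congr_left (by intro a _; simp [Nat.succ_eq_add_one]; ring)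
    conv_rhs => rw [startsF]
    rw [apply_ite (List.map (fun i : Nat => off + (i : Int)))]
    have hcond : ((b :: rest).getD 0 false && !((prev :: b :: rest).getD 0 false)) = (b && !prev) := by
      simp
    rw [hcond]
    split_ifs with hb
    · rw [List.map_cons, htail]
      simp
    · rw [List.nil_append]
      exact htail

theorem endsF_filter (w : List Bool) (off : Int) :
    ((List.range w.length).filter
        (fun i => w.getD i false && !(w.getD (i + 1) false))).map (fun i : Nat => off + (i : Int) + 1)
      = endsF w off := by
  induction w generalizing off with
  | nil => simp [endsF]
  | cons b rest ih =>
    rw [List.length_cons, List.range_succ_eq_map, List.filter_cons]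
    have htail :
        ((((List.range rest.length).map Nat.succ).filter
            (fun i => (b :: rest).getD i false && !((b :: rest).getD (i + 1) false))).map
          (fun i : Nat => off + (i : Int) + 1))
        = endsF rest (off + 1) := by
      have hfil : List.filter
            ((fun i => (b :: rest).getD i false && !((b :: rest).getD (i + 1) false)) ∘ Nat.succ)
            (List.range rest.length)
          = List.filter (fun i => rest.getD i false && !(rest.getD (i + 1) false))
            (List.range rest.length) :=
        List.filter_congr (by intro a _; simp [Function.comp, Nat.succ_eq_add_one])
      rw [List.filter_map, List.map_map, hfil, ← ih (off + 1)]
      exact List.map_congr_left (by intro a _; simp [Nat.succ_eq_add_one]; ring)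
    conv_rhs => rw [endsF]
    rw [apply_ite (List.map (fun i : Nat => off + (i : Int) + 1))]
    have hcond : ((b :: rest).getD 0 false && !((b :: rest).getD (0 + 1) false))
        = (b && !(rest.headD false)) := by
      cases rest <;> simp
    rw [hcond]
    split_ifs with hb
    · rw [List.map_cons, htail]
      simp
    · rw [List.nil_append]
      exact htail

-- prev does not matter when the head is non-word
theorem startsF_prev (w : List Bool) (i : Int) (h : w.headD false = false) (p q : Bool) :
    startsF p w i = startsF q w i := by
  cases w with
  | nil => rfl
  | cons b rest => simp_all [startsF]

-- inside a word run nothing starts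
theorem startsF_true_run (n : Nat) (w : List Bool) (i : Int) :
    startsF true (List.replicate n true ++ w) i = startsF true w (i + n) := by
  induction n generalizing i with
  | zero => simp
  | succ m ih =>
    simp only [List.replicate_succ, List.cons_append, startsF, Bool.not_true, Bool.and_false,
      Bool.false_eq_true, if_false, List.nil_append]
    rw [ih]
    have harith : i + 1 + (m : Int) = i + ((m + 1 : Nat) : Int) := by push_cast; ring
    rw [harith]

theorem startsF_run (n : Nat) (w : List Bool) (i : Int) (h : w.headD false = false) :
    startsF false (true :: (List.replicate n true ++ w)) i = i :: startsF false w (i + n + 1) := by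
  simp only [startsF, Bool.not_false, Bool.and_true, if_true, List.singleton_append]
  rw [startsF_true_run, startsF_prev w _ h true false]
  congr 2
  ring

theorem endsF_run (n : Nat) (w : List Bool) (i : Int) (h : w.headD false = false) :
    endsF (true :: (List.replicate n true ++ w)) i = (i + n + 1) :: endsF w (i + n + 1) := by
  induction n generalizing i with
  | zero =>
    rw [List.replicate_zero, List.nil_append, endsF, h]
    simp
  | succ m ih =>
    rw [List.replicate_succ, List.cons_append, endsF]
    simp only [List.headD_cons, Bool.not_true, Bool.and_false, Bool.false_eq_true, if_false,
      List.nil_append]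
    rw [ih]
    have harith : i + 1 + (m : Int) + 1 = i + ((m + 1 : Nat) : Int) + 1 := by push_cast; ring
    rw [harith]

-- the run remainder starts with a non-word character (or is empty)
theorem pvRun_head (cs : List Char) : ((pvRun true cs).2.map pvIsWord).headD false = false := by
  induction cs with
  | nil => simp [pvRun]
  | cons c rest ih =>
    by_cases h : pvIsWord c
    · simpa [pvRun, h] using ih
    · simp [pvRun, h]

theorem pvRun_decomp (cs : List Char) :
    cs.map pvIsWord = List.replicate (pvRun true cs).1 true ++ (pvRun true cs).2.map pvIsWord := by
  induction cs with
  | nil => simp [pvRun]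
  | cons c rest ih =>
    by_cases h : pvIsWord c
    · simp [pvRun, h, List.replicate_succ, ih]
    · simp [pvRun, h]

-- the run form equals the zip of the boundary lists
theorem pvGoB_eq_zip (cs : List Char) (i : Int) :
    pvGoB cs i = (startsF false (cs.map pvIsWord) i).zip (endsF (cs.map pvIsWord) i) := by
  induction hn : cs.length using Nat.strong_induction_on generalizing cs i with
  | _ n ih =>
  cases cs with
  | nil => simp [pvGoB, startsF, endsF]
  | cons c rest =>
    by_cases hc : pvIsWord c
    · rw [pvGoB]
      simp only [hc, if_true]
      have hlen : (pvRun true rest).2.length < n := by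
        subst hn; exact Nat.lt_succ_of_le (pvRun_snd_length true rest)
      rw [ih _ hlen _ _ rfl]
      rw [List.map_cons, hc, pvRun_decomp rest,
        startsF_run _ _ _ (pvRun_head rest), endsF_run _ _ _ (pvRun_head rest)]
      have : i + (((pvRun true rest).1 : Int) + 1) = i + (pvRun true rest).1 + 1 := by ring
      rw [this]
      simp [List.zip_cons_cons]
    · rw [pvGoB_nonword c rest i (by simpa using hc)]
      have hlen : rest.length < n := by subst hn; simp
      rw [ih _ hlen _ _ rfl]
      rw [List.map_cons]
      have hcf : pvIsWord c = false := by simpa using hc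
      rw [hcf]
      simp [startsF, endsF]

-- ===== VERDICT (by name: the statement is the Claim_ definition above) =====
theorem get_word_spans_spec : Claim_equal_get_word_spans := by
  intro code _
  unfold Spec_get_word_spans get_word_spans get_word_spans_alt
  rw [pvGoA_eq _ _ _ (by intro p hp; simp [PySem.Set.empty] at hp)]
  rw [pvGoB_eq_zip]
  simp only [PySem.Set.empty, List.nil_append]
  congr 1
  · rw [← startsF_filter (code.toList.map pvIsWord) false 0]
    have hpred : (fun i => (code.toList.map pvIsWord).getD i false &&
          (i == 0 || !((code.toList.map pvIsWord).getD (i - 1) false)))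
        = (fun i => (code.toList.map pvIsWord).getD i false &&
          !((false :: code.toList.map pvIsWord).getD i false)) := by
      funext i
      cases i <;> simp
    rw [hpred]
    exact List.map_congr_left (by intro a _; simp)
  · rw [← endsF_filter (code.toList.map pvIsWord) 0]
    have hpred : (List.range (code.toList.map pvIsWord).length).filter
          (fun i => (code.toList.map pvIsWord).getD i false &&
            (i == (code.toList.map pvIsWord).length - 1 ||
              !((code.toList.map pvIsWord).getD (i + 1) false)))
        = (List.range (code.toList.map pvIsWord).length).filter
          (fun i => (code.toList.map pvIsWord).getD i false &&
            !((code.toList.map pvIsWord).getD (i + 1) false)) := by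
      apply List.filter_congr
      intro i hi
      simp only [List.mem_range] at hi
      by_cases h : i = (code.toList.map pvIsWord).length - 1
      · have h1 : i + 1 = (code.toList.map pvIsWord).length := by omega
        rw [h1, List.getD_eq_default _ _ (le_refl _)]
        simp [h]
      · have h2 : ¬ i = code.length - 1 := by simpa using h
        have h3 : (i == code.length - 1) = false := by
          simpa using h2
        simp [h3]
    rw [hpred]
    exact List.map_congr_left (by intro a _; simp)
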